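-- pv_equiv track=rewrite | github.com/samAK02/TP-DM-THOR | chap4.py | calcul_LB3
-- ===== SOURCE A (Python) =====
-- def calcul_LB3(tasks):
--
--     n = len(tasks)
--     m = len(tasks[0][1])
--
--     LB3_j = []
--
--     for j in range(m):
--         # Somme des durées sur la machine j
--         sum_machine_j = sum(tasks[i][1][j] for i in range(n))
--
--         # Partie gauche : machines 1 à j-1
--         if j == 0:
--             left_min = 0
--         else:
--             left_min = min(
--                 sum(tasks[i][1][k] for k in range(j))
--                 for i in range(n)
--             )
--
--         # Partie droite : machines j+1 à m
--         if j == m - 1: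
--             right_min = 0
--         else:
--             right_min = min(
--                 sum(tasks[i][1][k] for k in range(j + 1, m))
--                 for i in range(n)
--             )
--
--         LB3_j.append(left_min + sum_machine_j + right_min)
--
--     return max(LB3_j), LB3_j
-- ===== SOURCE B (Python) =====
-- def calcul_LB3(tasks):
--     m = len(tasks[0][1])
--     # One pass per row: prefix sums p with p[j] = sum of the first j durations.
--     prefixes = []
--     for t in tasks:
--         durs = t[1]
--         p = [0]
--         acc = 0
--         for k in range(m):
--             acc += durs[k]
--             p.append(acc)
--         prefixes.append(p)
--     LB3_j = []
--     for j in range(m):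
--         col = sum(p[j + 1] - p[j] for p in prefixes)
--         left = 0 if j == 0 else min(p[j] for p in prefixes)
--         right = 0 if j == m - 1 else min(p[m] - p[j + 1] for p in prefixes)
--         LB3_j.append(left + col + right)
--     return max(LB3_j), LB3_j
-- ===== Notes on version B (the rewrite author's own statement) =====
-- stated objective: faster
-- what changed: B precomputes one prefix-sum list per task in a single pass, so each column's sum, left-min and right-min are O(n) lookups instead of A's O(n*m) recomputed inner sums per column.
import Mathlib
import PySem

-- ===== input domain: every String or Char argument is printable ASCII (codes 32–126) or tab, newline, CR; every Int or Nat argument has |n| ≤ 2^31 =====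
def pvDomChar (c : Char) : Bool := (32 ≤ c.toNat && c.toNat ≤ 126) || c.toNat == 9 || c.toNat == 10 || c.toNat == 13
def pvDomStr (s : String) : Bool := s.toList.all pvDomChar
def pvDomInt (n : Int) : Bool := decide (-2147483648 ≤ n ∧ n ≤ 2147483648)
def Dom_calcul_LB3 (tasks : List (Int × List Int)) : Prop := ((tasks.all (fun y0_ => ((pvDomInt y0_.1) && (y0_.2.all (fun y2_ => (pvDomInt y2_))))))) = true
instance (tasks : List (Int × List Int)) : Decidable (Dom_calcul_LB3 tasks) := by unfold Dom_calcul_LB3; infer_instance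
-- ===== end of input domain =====

-- B replaces A's per-column recomputed inner sums by per-task prefix sums built once
-- (O(n·m) instead of O(n·m²)); equivalence of the returned value is proved on Pre_.

-- ===== PORT A =====
-- tasks[i][1] (indices are in range under Pre_)
def pvRowA (tasks : List (Int × List Int)) (i : Nat) : List Int := (tasks.getD i (0, [])).2

def calcul_LB3 (tasks : List (Int × List Int)) : Int × List Int :=
  let n := tasks.length
  let m := (tasks.headD (0, [])).2.length
  let LB3_j := (List.range m).map (fun j =>
    let sum_machine_j := ((List.range n).map (fun i => (pvRowA tasks i).getD j 0)).sum
    let left_min : Int := if j = 0 then 0 else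
      (((List.range n).map (fun i =>
        ((List.range j).map (fun k => (pvRowA tasks i).getD k 0)).sum)).min?).getD 0
    let right_min : Int := if j = m - 1 then 0 else
      (((List.range n).map (fun i =>
        ((List.range' (j + 1) (m - (j + 1))).map (fun k => (pvRowA tasks i).getD k 0)).sum)).min?).getD 0
    left_min + sum_machine_j + right_min)
  ((LB3_j.max?).getD 0, LB3_j)

-- ===== PORT B =====
-- p = [0]; acc = 0; for k in range(m): acc += durs[k]; p.append(acc)
def pvPrefix (m : Nat) (durs : List Int) : List Int :=
  ((List.range m).foldl (fun (st : List Int × Int) k =>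
      let acc := st.2 + durs.getD k 0
      (st.1 ++ [acc], acc)) ([0], 0)).1

def calcul_LB3_alt (tasks : List (Int × List Int)) : Int × List Int :=
  let m := (tasks.headD (0, [])).2.length
  let prefixes := tasks.map (fun t => pvPrefix m t.2)
  let LB3_j := (List.range m).map (fun j =>
    let col := (prefixes.map (fun p => p.getD (j + 1) 0 - p.getD j 0)).sum
    let left : Int := if j = 0 then 0 else ((prefixes.map (fun p => p.getD j 0)).min?).getD 0
    let right : Int := if j = m - 1 then 0 else
      ((prefixes.map (fun p => p.getD m 0 - p.getD (j + 1) 0)).min?).getD 0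
    left + col + right)
  ((LB3_j.max?).getD 0, LB3_j)

-- ===== PRECONDITION & SPEC =====
-- Pre_ = exactly the inputs where A returns: tasks nonempty (tasks[0] would raise IndexError),
-- at least one machine (max([]) would raise ValueError), and every task has at least as many
-- durations as task 0 (otherwise an inner tasks[i][1][k] raises IndexError).
def Pre_calcul_LB3 (tasks : List (Int × List Int)) : Prop :=
  tasks ≠ [] ∧ 0 < (tasks.headD (0, [])).2.length ∧
    ∀ t ∈ tasks, (tasks.headD (0, [])).2.length ≤ t.2.length
instance (tasks : List (Int × List Int)) : Decidable (Pre_calcul_LB3 tasks) := by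
  unfold Pre_calcul_LB3; infer_instance

def pvWitness_calcul_LB3 : (List (Int × List Int)) := [(1, [2, 3]), (2, [4, 1])]

def Spec_calcul_LB3 (tasks : List (Int × List Int)) (out : Int × List Int) : Prop := out = calcul_LB3_alt tasks
instance (tasks : List (Int × List Int)) (out : Int × List Int) : Decidable (Spec_calcul_LB3 tasks out) := by unfold Spec_calcul_LB3; infer_instance

-- ===== CLAIM (what is proved, stated in full; the proofs are below) =====
def Claim_equal_calcul_LB3 : Prop := ∀ (tasks : List (Int × List Int)), Dom_calcul_LB3 tasks → Pre_calcul_LB3 tasks → Spec_calcul_LB3 tasks (calcul_LB3 tasks)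

-- ===== LEMMAS AND PROOFS =====

-- running partial sums produced by B's inner loop
def pvAcc (f : Nat → Int) : Int → List Nat → List Int
  | _, [] => []
  | acc, k :: t => (acc + f k) :: pvAcc f (acc + f k) t

theorem pvFold_eq (f : Nat → Int) : ∀ (l : List Nat) (p : List Int) (acc : Int),
    (l.foldl (fun (st : List Int × Int) k =>
      let a := st.2 + f k
      (st.1 ++ [a], a)) (p, acc)) = (p ++ pvAcc f acc l, acc + (l.map f).sum) := by
  intro l
  induction l with
  | nil => intro p acc; simp [pvAcc]
  | cons k t ih =>
      intro p acc
      simp only [List.foldl_cons, ih, pvAcc, List.map_cons, List.sum_cons]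
      rw [List.append_assoc, List.singleton_append, add_assoc]

theorem pvAcc_getD (f : Nat → Int) : ∀ (l : List Nat) (acc : Int) (q : Nat), q < l.length →
    (pvAcc f acc l).getD q 0 = acc + ((l.take (q + 1)).map f).sum := by
  intro l
  induction l with
  | nil => intro acc q h; simp at h
  | cons k t ih =>
      intro acc q h
      cases q with
      | zero => simp [pvAcc]
      | succ q =>
          simp only [pvAcc, List.getD_cons_succ, List.take_succ_cons, List.map_cons, List.sum_cons]
          rw [ih (acc + f k) q (by simpa using h)]
          ring

theorem pvPrefix_getD (durs : List Int) (m j : Nat) (hj : j ≤ m) :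
    (pvPrefix m durs).getD j 0 = ((List.range j).map (fun k => durs.getD k 0)).sum := by
  unfold pvPrefix
  rw [pvFold_eq]
  cases j with
  | zero => simp
  | succ q =>
      have hq : q < (List.range m).length := by simpa using hj
      simp only [List.cons_append, List.nil_append, List.getD_cons_succ]
      rw [pvAcc_getD _ _ _ _ hq, List.take_range]
      have hmin : min (q + 1) m = q + 1 := by omega
      simp [hmin]

-- A indexes row i of tasks; B maps over tasks directly: the two traversals agree elementwise
theorem pvRowMapEq {β : Type} (tasks : List (Int × List Int)) (g h : List Int → β)
    (hgh : ∀ t ∈ tasks, g t.2 = h t.2) :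
    (List.range tasks.length).map (fun i => g (pvRowA tasks i)) = tasks.map (fun t => h t.2) := by
  apply List.ext_getElem
  · simp
  · intro i h1 h2
    have hi : i < tasks.length := by simpa using h2
    simp only [List.getElem_map, List.getElem_range, pvRowA]
    rw [List.getD_eq_getElem tasks (0, []) hi]
    exact hgh _ (List.getElem_mem hi)

theorem pvSumSeg (l : List Int) (j m : Nat) (hjm : j + 1 ≤ m) :
    ((List.range' (j + 1) (m - (j + 1))).map (fun k => l.getD k 0)).sum
      = ((List.range m).map (fun k => l.getD k 0)).sum
        - ((List.range (j + 1)).map (fun k => l.getD k 0)).sum := by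
  have hsplit : List.range m = List.range (j + 1) ++ List.range' (j + 1) (m - (j + 1)) := by
    rw [List.range_eq_range', List.range_eq_range']
    have h := @List.range'_append_1 0 (j + 1) (m - (j + 1))
    simp only [Nat.zero_add] at h
    rw [h]
    congr 1
    omega
  rw [hsplit, List.map_append, List.sum_append]
  ring

-- ===== VERDICT (by name: the statement is the Claim_ definition above) =====
theorem calcul_LB3_spec : Claim_equal_calcul_LB3 := by
  intro tasks _ hpre
  obtain ⟨hne, hm0, hlen⟩ := hpre
  unfold Spec_calcul_LB3 calcul_LB3 calcul_LB3_alt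
  simp only []
  set m := (tasks.headD (0, [])).2.length with hm
  have hlb : (List.range m).map (fun j =>
      let sum_machine_j := ((List.range tasks.length).map (fun i => (pvRowA tasks i).getD j 0)).sum
      let left_min : Int := if j = 0 then 0 else
        (((List.range tasks.length).map (fun i =>
          ((List.range j).map (fun k => (pvRowA tasks i).getD k 0)).sum)).min?).getD 0
      let right_min : Int := if j = m - 1 then 0 else
        (((List.range tasks.length).map (fun i =>
          ((List.range' (j + 1) (m - (j + 1))).map (fun k => (pvRowA tasks i).getD k 0)).sum)).min?).getD 0
      left_min + sum_machine_j + right_min)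
    = (List.range m).map (fun j =>
      let col := ((tasks.map (fun t => pvPrefix m t.2)).map (fun p => p.getD (j + 1) 0 - p.getD j 0)).sum
      let left : Int := if j = 0 then 0 else
        (((tasks.map (fun t => pvPrefix m t.2)).map (fun p => p.getD j 0)).min?).getD 0
      let right : Int := if j = m - 1 then 0 else
        (((tasks.map (fun t => pvPrefix m t.2)).map (fun p => p.getD m 0 - p.getD (j + 1) 0)).min?).getD 0
      left + col + right) := by
    apply List.map_congr_left
    intro j hj
    rw [List.mem_range] at hj
    simp only [List.map_map]
    have hcol : ((List.range tasks.length).map (fun i => (pvRowA tasks i).getD j 0)).sum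
        = (tasks.map ((fun p : List Int => p.getD (j + 1) 0 - p.getD j 0) ∘ fun t => pvPrefix m t.2)).sum := by
      refine congrArg List.sum (pvRowMapEq tasks (fun l => l.getD j 0)
        (fun l => (pvPrefix m l).getD (j + 1) 0 - (pvPrefix m l).getD j 0) ?_)
      intro t ht
      beta_reduce
      rw [pvPrefix_getD t.2 m (j + 1) (by omega), pvPrefix_getD t.2 m j (by omega),
        List.range_succ, List.map_append, List.sum_append]
      simp
    have hleft : ((List.range tasks.length).map (fun i =>
          ((List.range j).map (fun k => (pvRowA tasks i).getD k 0)).sum))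
        = (tasks.map ((fun p : List Int => p.getD j 0) ∘ fun t => pvPrefix m t.2)) := by
      refine pvRowMapEq tasks (fun l => ((List.range j).map (fun k => l.getD k 0)).sum)
        (fun l => (pvPrefix m l).getD j 0) ?_
      intro t ht
      beta_reduce
      rw [pvPrefix_getD t.2 m j (by omega)]
    have hright : (j = m - 1) ∨ ((List.range tasks.length).map (fun i =>
          ((List.range' (j + 1) (m - (j + 1))).map (fun k => (pvRowA tasks i).getD k 0)).sum))
        = (tasks.map ((fun p : List Int => p.getD m 0 - p.getD (j + 1) 0) ∘ fun t => pvPrefix m t.2)) := by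
      by_cases hjm : j = m - 1
      · exact Or.inl hjm
      · refine Or.inr (pvRowMapEq tasks
          (fun l => ((List.range' (j + 1) (m - (j + 1))).map (fun k => l.getD k 0)).sum)
          (fun l => (pvPrefix m l).getD m 0 - (pvPrefix m l).getD (j + 1) 0) ?_)
        intro t ht
        beta_reduce
        rw [pvPrefix_getD t.2 m m (le_refl m), pvPrefix_getD t.2 m (j + 1) (by omega),
          pvSumSeg t.2 j m (by omega)]
    rw [hcol, hleft]
    by_cases hjm : j = m - 1
    · simp [hjm]
    · rcases hright with h | h
      · exact absurd h hjm
      · rw [h]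
  rw [hlb]
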